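-- pv_equiv track=rewrite | github.com/waldohidalgo/geek-for-geeks-100daysofcodechallenge | BonusProblem/8Prefix Sum/1Number of times graph cuts X-axis.py | touchedXaxis
-- ===== SOURCE A (Python) =====
-- def touchedXaxis(arr):
--     # code here
--     ct=1
--     acc=0
--     for el in arr:
--         if acc<0<=acc+el or acc>0>=acc+el:
--             ct+=1
--         acc+=el
--     return ct-1
-- ===== SOURCE B (Python) =====
-- def touchedXaxis(arr):
--     # Run-length-compress the SIGNS of the prefix sums, then count with run arithmetic:
--     # a crossing happens exactly when a nonzero-sign run is followed by another run,
--     # so the answer is the number of nonzero runs excluding the last run.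
--     def sign(x):
--         return (x > 0) - (x < 0)
--     runs = [0]          # sign of the initial prefix 0
--     acc = 0
--     for el in arr:
--         acc += el
--         s = sign(acc)
--         if s != runs[-1]:
--             runs.append(s)
--     return sum(1 for s in runs[:-1] if s != 0)
-- ===== Notes on version B (the rewrite author's own statement) =====
-- stated objective: alternative
-- what changed: B abstracts each prefix sum to its sign, run-length-compresses the sign sequence, and returns the number of nonzero runs excluding the last, instead of A's accumulator loop testing the crossing inequality at every step.
import Mathlib
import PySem

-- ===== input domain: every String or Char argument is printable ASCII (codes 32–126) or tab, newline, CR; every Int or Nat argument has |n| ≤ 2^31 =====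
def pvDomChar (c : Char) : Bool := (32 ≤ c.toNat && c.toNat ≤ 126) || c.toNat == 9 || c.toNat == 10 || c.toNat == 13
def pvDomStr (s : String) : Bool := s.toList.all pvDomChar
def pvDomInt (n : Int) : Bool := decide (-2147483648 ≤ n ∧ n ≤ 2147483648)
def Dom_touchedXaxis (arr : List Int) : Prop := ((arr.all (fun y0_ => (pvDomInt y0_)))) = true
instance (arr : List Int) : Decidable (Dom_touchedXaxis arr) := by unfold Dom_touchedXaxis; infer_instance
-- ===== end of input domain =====

-- B replaces A's per-step crossing test by run-length compression of the prefix-sum sign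
-- sequence, counting nonzero runs except the last (alternative decomposition, same cost).


-- ===== PORT A =====
-- literal port of A: state (ct, acc), start (1, 0), return ct - 1
def touchedXaxisStep (s : Int × Int) (el : Int) : Int × Int :=
  (if (s.2 < 0 ∧ 0 ≤ s.2 + el) ∨ (s.2 > 0 ∧ 0 ≥ s.2 + el) then s.1 + 1 else s.1, s.2 + el)

def touchedXaxis (arr : List Int) : Int :=
  (arr.foldl touchedXaxisStep (1, 0)).1 - 1

-- ===== PORT B =====
-- sign(x) = (x > 0) - (x < 0)
def signInt (x : Int) : Int :=
  (if x > 0 then (1 : Int) else 0) - (if x < 0 then (1 : Int) else 0)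

-- B's loop state is (acc, runs); runs is kept head-first (reversed relative to the
-- Python list), so Python's runs[-1] is the head and runs.append is a cons.
def touchedXaxisAltStep (s : Int × List Int) (el : Int) : Int × List Int :=
  let acc := s.1 + el
  let sg := signInt acc
  (acc, if sg ≠ s.2.headI then sg :: s.2 else s.2)

-- runs[:-1] of the Python list is the tail of the reversed runs; count its nonzeros
def touchedXaxis_alt (arr : List Int) : Int :=
  let runs := (arr.foldl touchedXaxisAltStep (0, [0])).2
  ((runs.tail.countP (fun s => s != 0)) : Nat)

-- ===== PRECONDITION & SPEC =====
def Spec_touchedXaxis (arr : List Int) (out : Int) : Prop := out = touchedXaxis_alt arr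
instance (arr : List Int) (out : Int) : Decidable (Spec_touchedXaxis arr out) := by unfold Spec_touchedXaxis; infer_instance

-- ===== CLAIM =====
def Claim_equal_touchedXaxis : Prop := ∀ (arr : List Int), Dom_touchedXaxis arr → Spec_touchedXaxis arr (touchedXaxis arr)

-- ===== LEMMAS AND PROOFS =====

-- Invariant: starting A from (ct, acc) and B from (acc, signInt acc :: rest), A's counter
-- gain equals the gain in nonzero entries of the tail of B's run list.
theorem touchedXaxis_invariant (arr : List Int) :
    ∀ (ct acc : Int) (rest : List Int),
      (arr.foldl touchedXaxisStep (ct, acc)).1 - ct =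
        (((arr.foldl touchedXaxisAltStep (acc, signInt acc :: rest)).2.tail.countP
            (fun s => s != 0) : Nat) : Int)
          - ((rest.countP (fun s => s != 0) : Nat) : Int) := by
  induction arr with
  | nil => intro ct acc rest; simp
  | cons el t ih =>
    intro ct acc rest
    simp only [List.foldl_cons, touchedXaxisStep, touchedXaxisAltStep, List.headI]
    by_cases hs : signInt (acc + el) = signInt acc
    · have hcr : ¬ ((acc < 0 ∧ 0 ≤ acc + el) ∨ (acc > 0 ∧ 0 ≥ acc + el)) := by
        simp only [signInt] at hs; split_ifs at hs <;> omega
      simp only [hs, if_neg hcr, ne_eq, not_true_eq_false, if_false]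
      rw [← hs]
      exact ih ct (acc + el) rest
    · by_cases h0 : signInt acc = 0
      · have hcr : ¬ ((acc < 0 ∧ 0 ≤ acc + el) ∨ (acc > 0 ∧ 0 ≥ acc + el)) := by
          simp only [signInt] at h0 ⊢; split_ifs at h0 <;> omega
        simp only [if_neg hcr, ne_eq, hs, not_false_eq_true, if_true]
        have := ih ct (acc + el) (signInt acc :: rest)
        rw [this]
        simp [h0]
      · have hcr : (acc < 0 ∧ 0 ≤ acc + el) ∨ (acc > 0 ∧ 0 ≥ acc + el) := by
          simp only [signInt] at hs h0 ⊢; split_ifs at hs h0 <;> omega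
        simp only [if_pos hcr, ne_eq, hs, not_false_eq_true, if_true]
        have := ih (ct + 1) (acc + el) (signInt acc :: rest)
        have hcount : List.countP (fun s => s != 0) (signInt acc :: rest) =
            List.countP (fun s => s != 0) rest + 1 := by
          simp [List.countP_cons, h0]
        rw [hcount] at this
        push_cast at this ⊢
        omega

-- ===== VERDICT =====
theorem touchedXaxis_spec : Claim_equal_touchedXaxis := by
  intro arr _
  unfold Spec_touchedXaxis touchedXaxis touchedXaxis_alt
  have h := touchedXaxis_invariant arr 1 0 []
  simp only [signInt] at h
  norm_num at h
  omega
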